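-- pv_equiv track=rewrite | github.com/tomastraini/ai-orchestrator | services/dev/dev_executor.py | _violates_constraints
-- ===== SOURCE A (Python) =====
-- from typing import Any, Callable, Dict, List, Literal, Optional, Tuple
--
-- def _violates_constraints(command: str, constraints: List[str]) -> Optional[str]:
--     low_cmd = f" {command.lower()} "
--     for raw_constraint in constraints:
--         constraint = str(raw_constraint or "").strip().lower()
--         if not constraint:
--             continue
--         if ("no git push" in constraint or "do not push" in constraint) and " git push " in low_cmd:
--             return f"violates constraint '{raw_constraint}'"
--         if "no git" in constraint and " git " in low_cmd:
--             return f"violates constraint '{raw_constraint}'"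
--         if (
--             "no dev server" in constraint
--             or "do not run dev server" in constraint
--             or "do not start server" in constraint
--             or "no npm start" in constraint
--         ) and any(token in low_cmd for token in [" npm start ", " npm run dev ", " pnpm dev ", " yarn dev ", " vite "]):
--             return f"violates constraint '{raw_constraint}'"
--         if ("no install" in constraint or "do not install" in constraint) and any(
--             token in low_cmd for token in [" npm install ", " pnpm install ", " yarn install ", " pip install "]
--         ):
--             return f"violates constraint '{raw_constraint}'"
--     return None
-- ===== SOURCE B (Python) =====
-- # Inverts A's decomposition: scan the command ONCE to build the set of trigger
-- # phrases that are "active" (their rule's token occurs in the command), then a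
-- # single pass over the constraints returns the first one containing any active
-- # phrase.  Correct because token-in-command does not depend on the constraint.
-- def _violates_constraints(command, constraints):
--     low = f" {command.lower()} "
--     active = []
--     if " git push " in low:
--         active += ["no git push", "do not push"]
--     if " git " in low:
--         active += ["no git"]
--     if any(t in low for t in (" npm start ", " npm run dev ", " pnpm dev ", " yarn dev ", " vite ")):
--         active += ["no dev server", "do not run dev server", "do not start server", "no npm start"]
--     if any(t in low for t in (" npm install ", " pnpm install ", " yarn install ", " pip install ")):
--         active += ["no install", "do not install"]
--     for raw in constraints:
--         c = (raw or "").strip().lower()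
--         if any(p in c for p in active):
--             return f"violates constraint '{raw}'"
--     return None
-- ===== Notes on version B (the rewrite author's own statement) =====
-- stated objective: alternative
-- what changed: B inverts the loop structure: the command is scanned once up front to build the list of active trigger phrases (those whose rule's token occurs in the command), then a single pass over the constraints returns the first containing any active phrase, instead of re-testing all command tokens inside every constraint iteration.
import Mathlib
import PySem

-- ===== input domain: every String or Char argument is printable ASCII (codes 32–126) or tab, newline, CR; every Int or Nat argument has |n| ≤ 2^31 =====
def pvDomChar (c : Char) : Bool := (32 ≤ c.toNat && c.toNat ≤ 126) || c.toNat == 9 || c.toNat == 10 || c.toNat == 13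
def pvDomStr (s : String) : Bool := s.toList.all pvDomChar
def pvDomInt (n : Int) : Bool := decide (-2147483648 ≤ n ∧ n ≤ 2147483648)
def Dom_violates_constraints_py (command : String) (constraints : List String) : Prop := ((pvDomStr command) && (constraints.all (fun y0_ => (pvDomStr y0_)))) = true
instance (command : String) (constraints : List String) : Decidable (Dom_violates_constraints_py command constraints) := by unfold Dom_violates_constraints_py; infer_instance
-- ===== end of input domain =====

-- B hoists all command-token tests out of the constraint loop: it scans the command
-- once to build the active trigger-phrase list, then one pass finds the first
-- constraint containing an active phrase.  Proved equal on the whole domain.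

-- ===== PORT A =====
-- f"violates constraint '{raw}'"
def pvMsg (raw : String) : String := "violates constraint '" ++ raw ++ "'"

-- A's for-loop over constraints; low_cmd is fixed
def pvLoopA (low_cmd : String) : List String → Option String
  | [] => none
  | raw :: rest =>
    -- str(raw or "").strip().lower(): for a str argument, 'raw or ""' is raw itself
    let c := PySem.Str.lower (PySem.Str.strip raw)
    if c = "" then pvLoopA low_cmd rest
    else if (PySem.Str.isIn "no git push" c || PySem.Str.isIn "do not push" c)
            && PySem.Str.isIn " git push " low_cmd then some (pvMsg raw)
    else if PySem.Str.isIn "no git" c && PySem.Str.isIn " git " low_cmd then some (pvMsg raw)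
    else if (PySem.Str.isIn "no dev server" c || PySem.Str.isIn "do not run dev server" c
             || PySem.Str.isIn "do not start server" c || PySem.Str.isIn "no npm start" c)
            && ([" npm start ", " npm run dev ", " pnpm dev ", " yarn dev ", " vite "].any
                 (fun tok => PySem.Str.isIn tok low_cmd)) then some (pvMsg raw)
    else if (PySem.Str.isIn "no install" c || PySem.Str.isIn "do not install" c)
            && ([" npm install ", " pnpm install ", " yarn install ", " pip install "].any
                 (fun tok => PySem.Str.isIn tok low_cmd)) then some (pvMsg raw)
    else pvLoopA low_cmd rest

def violates_constraints_py (command : String) (constraints : List String) : Option String :=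
  pvLoopA (" " ++ PySem.Str.lower command ++ " ") constraints

-- ===== PORT B =====
-- the active trigger phrases, built from the command once (B's four 'if … active +=' steps)
def pvActive (low : String) : List String :=
  (if PySem.Str.isIn " git push " low then ["no git push", "do not push"] else []) ++
  (if PySem.Str.isIn " git " low then ["no git"] else []) ++
  (if [" npm start ", " npm run dev ", " pnpm dev ", " yarn dev ", " vite "].any
       (fun t => PySem.Str.isIn t low) then
     ["no dev server", "do not run dev server", "do not start server", "no npm start"] else []) ++
  (if [" npm install ", " pnpm install ", " yarn install ", " pip install "].any
       (fun t => PySem.Str.isIn t low) then ["no install", "do not install"] else [])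

-- B's single pass over the constraints
def pvLoopB (active : List String) : List String → Option String
  | [] => none
  | raw :: rest =>
    let c := PySem.Str.lower (PySem.Str.strip raw)
    if active.any (fun p => PySem.Str.isIn p c) then some (pvMsg raw)
    else pvLoopB active rest

def violates_constraints_py_alt (command : String) (constraints : List String) : Option String :=
  pvLoopB (pvActive (" " ++ PySem.Str.lower command ++ " ")) constraints

-- ===== PRECONDITION & SPEC =====
def Spec_violates_constraints_py (command : String) (constraints : List String) (out : Option String) : Prop := out = violates_constraints_py_alt command constraints
instance (command : String) (constraints : List String) (out : Option String) : Decidable (Spec_violates_constraints_py command constraints out) := by unfold Spec_violates_constraints_py; infer_instance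

-- ===== CLAIM (what is proved, stated in full; the proofs are below) =====
def Claim_equal_violates_constraints_py : Prop := ∀ (command : String) (constraints : List String), Dom_violates_constraints_py command constraints → Spec_violates_constraints_py command constraints (violates_constraints_py command constraints)

-- ===== LEMMAS AND PROOFS =====

theorem pvIfChain4 {α : Type} (b1 b2 b3 b4 : Bool) (m f : α) :
    (if b1 then m else if b2 then m else if b3 then m else if b4 then m else f)
      = (if b1 || b2 || b3 || b4 then m else f) := by
  cases b1 <;> cases b2 <;> cases b3 <;> cases b4 <;> rfl

-- scanning the hoisted active list equals the disjunction of A's four conditions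
theorem pvActive_any (low c : String) :
    (pvActive low).any (fun p => PySem.Str.isIn p c)
      = ((PySem.Str.isIn "no git push" c || PySem.Str.isIn "do not push" c)
           && PySem.Str.isIn " git push " low
         || PySem.Str.isIn "no git" c && PySem.Str.isIn " git " low
         || (PySem.Str.isIn "no dev server" c || PySem.Str.isIn "do not run dev server" c
             || PySem.Str.isIn "do not start server" c || PySem.Str.isIn "no npm start" c)
            && ([" npm start ", " npm run dev ", " pnpm dev ", " yarn dev ", " vite "].any
                 (fun tok => PySem.Str.isIn tok low))
         || (PySem.Str.isIn "no install" c || PySem.Str.isIn "do not install" c)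
            && ([" npm install ", " pnpm install ", " yarn install ", " pip install "].any
                 (fun tok => PySem.Str.isIn tok low))) := by
  unfold pvActive
  cases h1 : PySem.Str.isIn " git push " low <;>
  cases h2 : PySem.Str.isIn " git " low <;>
  cases h3 : [" npm start ", " npm run dev ", " pnpm dev ", " yarn dev ", " vite "].any
      (fun t => PySem.Str.isIn t low) <;>
  cases h4 : [" npm install ", " pnpm install ", " yarn install ", " pip install "].any
      (fun t => PySem.Str.isIn t low) <;>
  simp [List.any_cons, List.any_nil, Bool.or_assoc]

-- no phrase occurs in the empty constraint
theorem pvActive_any_empty (low : String) :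
    (pvActive low).any (fun p => PySem.Str.isIn p "") = false := by
  unfold pvActive
  cases PySem.Str.isIn " git push " low <;>
  cases PySem.Str.isIn " git " low <;>
  cases [" npm start ", " npm run dev ", " pnpm dev ", " yarn dev ", " vite "].any
      (fun t => PySem.Str.isIn t low) <;>
  cases [" npm install ", " pnpm install ", " yarn install ", " pip install "].any
      (fun t => PySem.Str.isIn t low) <;>
  simp [List.any_cons, List.any_nil] <;> decide

theorem pvLoop_eq (low_cmd : String) (cs : List String) :
    pvLoopA low_cmd cs = pvLoopB (pvActive low_cmd) cs := by
  induction cs with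
  | nil => rfl
  | cons raw rest ih =>
    simp only [pvLoopA, pvLoopB]
    by_cases hc : PySem.Str.lower (PySem.Str.strip raw) = ""
    · rw [hc, if_pos rfl, pvActive_any_empty, if_neg (by simp), ih]
    · rw [if_neg hc, pvActive_any, ih, pvIfChain4]

-- ===== VERDICT =====
theorem violates_constraints_py_spec : Claim_equal_violates_constraints_py := by
  intro command constraints _
  unfold Spec_violates_constraints_py violates_constraints_py violates_constraints_py_alt
  exact pvLoop_eq _ _
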